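-- pv_equiv track=rewrite | github.com/bre-cho/veo | backend/app/services/template_intelligence.py | get_style_preset
-- ===== SOURCE A (Python) =====
-- _MARKET_TO_STYLE_PRESET: dict[str, str] = {
--     # South-east Asia
--     "vi-VN": "vibrant_minimal",
--     "th-TH": "vibrant_minimal",
--     "id-ID": "vibrant_minimal",
--     "ms-MY": "vibrant_minimal",
--     "tl-PH": "vibrant_minimal",
--     # East Asia
--     "zh-CN": "clean_modern",
--     "zh-TW": "clean_modern",
--     "ja-JP": "clean_modern",
--     "ko-KR": "clean_modern",
--     # South Asia
--     "hi-IN": "bold_expressive",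
--     "bn-BD": "bold_expressive",
--     # English-speaking markets
--     "en-US": "professional_bold",
--     "en-GB": "professional_bold",
--     "en-AU": "professional_bold",
--     "en-CA": "professional_bold",
--     # Western Europe
--     "fr-FR": "elegant_minimal",
--     "de-DE": "clean_modern",
--     "es-ES": "vibrant_minimal",
--     "it-IT": "elegant_minimal",
--     "pt-PT": "vibrant_minimal",
--     "pt-BR": "vibrant_minimal",
--     # Middle East
--     "ar-SA": "bold_expressive",
--     "ar-AE": "bold_expressive",
--     # Default
--     "_default": "professional_bold",
-- }
--
-- def get_style_preset(market_code: str) -> str: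
--     """Return the recommended style preset for the given market/locale."""
--     # Try exact match first, then language prefix (e.g. "en" from "en-XX")
--     preset = _MARKET_TO_STYLE_PRESET.get(market_code)
--     if preset:
--         return preset
--     lang_prefix = market_code.split("-")[0] if market_code else ""
--     for key, value in _MARKET_TO_STYLE_PRESET.items():
--         if key.startswith(lang_prefix + "-"):
--             return value
--     return _MARKET_TO_STYLE_PRESET["_default"]
-- ===== SOURCE B (Python) =====
-- _MARKET_TO_STYLE_PRESET: dict[str, str] = {
--     "vi-VN": "vibrant_minimal",
--     "th-TH": "vibrant_minimal",
--     "id-ID": "vibrant_minimal",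
--     "ms-MY": "vibrant_minimal",
--     "tl-PH": "vibrant_minimal",
--     "zh-CN": "clean_modern",
--     "zh-TW": "clean_modern",
--     "ja-JP": "clean_modern",
--     "ko-KR": "clean_modern",
--     "hi-IN": "bold_expressive",
--     "bn-BD": "bold_expressive",
--     "en-US": "professional_bold",
--     "en-GB": "professional_bold",
--     "en-AU": "professional_bold",
--     "en-CA": "professional_bold",
--     "fr-FR": "elegant_minimal",
--     "de-DE": "clean_modern",
--     "es-ES": "vibrant_minimal",
--     "it-IT": "elegant_minimal",
--     "pt-PT": "vibrant_minimal",
--     "pt-BR": "vibrant_minimal",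
--     "ar-SA": "bold_expressive",
--     "ar-AE": "bold_expressive",
--     "_default": "professional_bold",
-- }
--
-- # Precomputed once at import time: language prefix -> style of its first locale entry.
-- _LANG_TO_STYLE: dict[str, str] = {}
-- for _k, _v in _MARKET_TO_STYLE_PRESET.items():
--     if "-" in _k:
--         _LANG_TO_STYLE.setdefault(_k.split("-")[0], _v)
--
--
-- def get_style_preset(market_code: str) -> str:
--     """Return the recommended style preset for the given market/locale."""
--     preset = _MARKET_TO_STYLE_PRESET.get(market_code)
--     if preset:
--         return preset
--     lang = market_code.split("-")[0] if market_code else ""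
--     return _LANG_TO_STYLE.get(lang) or _MARKET_TO_STYLE_PRESET["_default"]
-- ===== Notes on version B (the rewrite author's own statement) =====
-- stated objective: simpler
-- what changed: Replaces A's call-time linear startswith-scan over the whole market table with a language-prefix index precomputed once at import time (first occurrence wins), so the function body becomes two dict lookups and a default.
import Mathlib
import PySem

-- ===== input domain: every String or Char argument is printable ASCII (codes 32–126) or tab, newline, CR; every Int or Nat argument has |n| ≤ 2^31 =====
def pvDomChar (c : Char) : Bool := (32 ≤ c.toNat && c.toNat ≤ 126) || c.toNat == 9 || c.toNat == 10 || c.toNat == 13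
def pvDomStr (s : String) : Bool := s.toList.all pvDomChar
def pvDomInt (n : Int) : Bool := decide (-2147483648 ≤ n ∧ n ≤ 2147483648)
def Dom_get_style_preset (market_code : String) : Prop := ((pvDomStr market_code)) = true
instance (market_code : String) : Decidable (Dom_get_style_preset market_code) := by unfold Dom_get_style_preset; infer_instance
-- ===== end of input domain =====

-- B replaces A's call-time linear startswith-scan over the market table with a
-- language-prefix index precomputed once (first occurrence wins); objective: simpler.

-- ===== PORT A =====
-- the module-level _MARKET_TO_STYLE_PRESET dict (shared data of both Pythons)
def pvMARKET : PySem.Dict String String :=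
  PySem.Dict.ofList [("vi-VN", "vibrant_minimal"), ("th-TH", "vibrant_minimal"), ("id-ID", "vibrant_minimal"), ("ms-MY", "vibrant_minimal"), ("tl-PH", "vibrant_minimal"), ("zh-CN", "clean_modern"), ("zh-TW", "clean_modern"), ("ja-JP", "clean_modern"), ("ko-KR", "clean_modern"), ("hi-IN", "bold_expressive"), ("bn-BD", "bold_expressive"), ("en-US", "professional_bold"), ("en-GB", "professional_bold"), ("en-AU", "professional_bold"), ("en-CA", "professional_bold"), ("fr-FR", "elegant_minimal"), ("de-DE", "clean_modern"), ("es-ES", "vibrant_minimal"), ("it-IT", "elegant_minimal"), ("pt-PT", "vibrant_minimal"), ("pt-BR", "vibrant_minimal"), ("ar-SA", "bold_expressive"), ("ar-AE", "bold_expressive"), ("_default", "professional_bold")]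

-- the `for key, value in _MARKET_TO_STYLE_PRESET.items(): if key.startswith(...): return value`
-- loop of A, with the fall-through `return _MARKET_TO_STYLE_PRESET["_default"]` (key always
-- present, so `.getD ""` is exact — no KeyError is reachable)
def pvScan : List (String × String) → String → String
  | [], _ => (PySem.Dict.get? pvMARKET "_default").getD ""
  | (k, v) :: t, pref => if PySem.Str.startswith k pref then v else pvScan t pref

-- every value of the dict is a nonempty string, so Python's truthiness test `if preset:`
-- on `preset = dict.get(market_code)` is exactly `(get? …).getD "" ≠ ""`
def get_style_preset (market_code : String) : String :=
  let preset := (PySem.Dict.get? pvMARKET market_code).getD ""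
  if preset ≠ "" then preset
  else
    let lang_prefix :=
      if market_code ≠ "" then ((PySem.Str.split? market_code "-").getD []).headD "" else ""
    pvScan pvMARKET.items (lang_prefix ++ "-")

-- ===== PORT B =====
-- the module-level precomputation loop of Source B: first occurrence of each language prefix
def pvLangIndex : PySem.Dict String String :=
  pvMARKET.items.foldl
    (fun d kv =>
      if PySem.Str.isIn "-" kv.1 then
        d.setdefault (((PySem.Str.split? kv.1 "-").getD []).headD "") kv.2
      else d)
    PySem.Dict.empty

-- `_LANG_TO_STYLE.get(lang) or _MARKET_TO_STYLE_PRESET["_default"]`: all stored values are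
-- nonempty strings, so `x or y` is `if x ≠ "" then x else y` on `(get? …).getD ""`
def get_style_preset_alt (market_code : String) : String :=
  let preset := (PySem.Dict.get? pvMARKET market_code).getD ""
  if preset ≠ "" then preset
  else
    let lang :=
      if market_code ≠ "" then ((PySem.Str.split? market_code "-").getD []).headD "" else ""
    let fromLang := (PySem.Dict.get? pvLangIndex lang).getD ""
    if fromLang ≠ "" then fromLang
    else (PySem.Dict.get? pvMARKET "_default").getD ""

-- ===== PRECONDITION & SPEC =====
def Spec_get_style_preset (market_code : String) (out : String) : Prop := out = get_style_preset_alt market_code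
instance (market_code : String) (out : String) : Decidable (Spec_get_style_preset market_code out) := by unfold Spec_get_style_preset; infer_instance

-- ===== CLAIM (what is proved, stated in full; the proofs are below) =====
def Claim_equal_get_style_preset : Prop := ∀ (market_code : String), Dom_get_style_preset market_code → Spec_get_style_preset market_code (get_style_preset market_code)

-- ===== LEMMAS AND PROOFS =====

theorem pvGoAcc (sep : List Char) (fuel : Nat) (l cur : List Char) (acc : List (List Char)) :
    PySem.Chars.splitOn.go sep fuel l cur acc
      = acc.reverse ++ PySem.Chars.splitOn.go sep fuel l cur [] := by
  induction fuel generalizing l cur acc with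
  | zero => simp [PySem.Chars.splitOn.go]
  | succ n ih =>
    cases l with
    | nil => simp [PySem.Chars.splitOn.go]
    | cons c rest =>
      rw [PySem.Chars.splitOn.go, PySem.Chars.splitOn.go]
      by_cases hp : sep.isPrefixOf (c :: rest) = true
      · rw [ih _ _ (cur.reverse :: acc), ih _ _ [cur.reverse]]
        simp [hp]
      · rw [ih rest (c :: cur) acc]
        simp [hp]

theorem pvGoHead (fuel : Nat) (l cur : List Char) (h : l.length ≤ fuel) :
    (PySem.Chars.splitOn.go ['-'] fuel l cur []).headD []
      = cur.reverse ++ l.takeWhile (· ≠ '-') := by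
  induction fuel generalizing l cur with
  | zero =>
    have : l = [] := List.eq_nil_of_length_eq_zero (Nat.le_zero.mp h)
    subst this
    simp [PySem.Chars.splitOn.go]
  | succ n ih =>
    cases l with
    | nil => simp [PySem.Chars.splitOn.go]
    | cons c rest =>
      rw [PySem.Chars.splitOn.go]
      by_cases hp : ['-'].isPrefixOf (c :: rest) = true
      · have hc' : '-' = c := by simpa [List.isPrefixOf] using hp
        have hc : c = '-' := hc'.symm
        rw [if_pos hp, pvGoAcc]
        subst hc
        simp [List.takeWhile]
      · rw [if_neg hp]
        have hc : c ≠ '-' := by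
          intro hc; subst hc; simp [List.isPrefixOf] at hp
        rw [ih rest (c :: cur) (by simpa using Nat.le_of_succ_le_succ h)]
        simp [List.takeWhile, hc]

theorem pvSplitHead (s : List Char) :
    (PySem.Chars.splitOn s ['-']).headD [] = s.takeWhile (· ≠ '-') := by
  rw [PySem.Chars.splitOn]
  exact pvGoHead (s.length + 1) s [] (by omega)

-- the language prefix computed by both Pythons never contains '-'
theorem pvLangChars (mc : String) :
    (if mc ≠ "" then ((PySem.Str.split? mc "-").getD []).headD "" else "").toList
      = if mc ≠ "" then mc.toList.takeWhile (· ≠ '-') else [] := by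
  by_cases h : mc ≠ ""
  · rw [if_pos h, if_pos h]
    have hmap := PySem.Str.split?_map mc "-"
    have hch : PySem.Chars.split? mc.toList "-".toList
        = some (PySem.Chars.splitOn mc.toList ['-']) := by
      simp [PySem.Chars.split?]
    rw [hch] at hmap
    cases hL : PySem.Str.split? mc "-" with
    | none => rw [hL] at hmap; simp at hmap
    | some L =>
      rw [hL] at hmap
      simp only [Option.map_some, Option.some.injEq] at hmap
      simp only [Option.getD_some]
      rw [← pvSplitHead mc.toList, ← hmap]
      cases L with
      | nil => simp
      | cons a t => simp
  · rw [if_neg h, if_neg h]; rfl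

theorem pvLangDashFree (mc : String) :
    '-' ∉ (if mc ≠ "" then ((PySem.Str.split? mc "-").getD []).headD "" else "").toList := by
  rw [pvLangChars]
  by_cases h : mc ≠ ""
  · rw [if_pos h]
    intro hm
    have := List.mem_takeWhile_imp hm
    simp at this
  · rw [if_neg h]; simp

theorem pvPreIff (l k1 rest : List Char) (hl : '-' ∉ l) (hk : '-' ∉ k1) :
    (l ++ ['-']) <+: (k1 ++ '-' :: rest) ↔ l = k1 := by
  induction l generalizing k1 with
  | nil =>
    cases k1 with
    | nil => simp
    | cons a t =>
      simp only [List.nil_append, List.cons_append]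
      constructor
      · intro hpre
        rcases hpre with ⟨u, hu⟩
        simp only [List.cons_append, List.cons.injEq] at hu
        have hm : ('-' : Char) ∈ a :: t := by rw [← hu.1]; exact List.mem_cons_self
        exact (hk hm).elim
      · intro h; cases h
  | cons x l' ih =>
    cases k1 with
    | nil =>
      simp only [List.cons_append, List.nil_append]
      constructor
      · intro hpre
        rcases hpre with ⟨u, hu⟩
        simp only [List.cons_append, List.cons.injEq] at hu
        have hm : ('-' : Char) ∈ x :: l' := by rw [hu.1]; exact List.mem_cons_self
        exact (hl hm).elim
      · intro h; cases h
    | cons a t =>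
      simp only [List.cons_append, List.cons_prefix_cons, List.cons.injEq]
      have hl' : '-' ∉ l' := fun hm => hl (List.mem_cons_of_mem _ hm)
      have hk' : '-' ∉ t := fun hm => hk (List.mem_cons_of_mem _ hm)
      rw [ih t hl' hk']

theorem pvSwFalse (l k1 rest : List Char) (hl : '-' ∉ l) (hk : '-' ∉ k1) (hne : l ≠ k1) :
    PySem.Chars.startswith (k1 ++ '-' :: rest) (l ++ ['-']) = false := by
  by_contra hc
  have hb : PySem.Chars.startswith (k1 ++ '-' :: rest) (l ++ ['-']) = true := by
    revert hc; cases PySem.Chars.startswith (k1 ++ '-' :: rest) (l ++ ['-']) <;> simp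
  exact hne ((pvPreIff l k1 rest hl hk).mp ((PySem.Chars.startswith_iff _ _).mp hb))

theorem pvSwNodash (l k : List Char) (hk : '-' ∉ k) :
    PySem.Chars.startswith k (l ++ ['-']) = false := by
  by_contra hc
  have hb : PySem.Chars.startswith k (l ++ ['-']) = true := by
    revert hc; cases PySem.Chars.startswith k (l ++ ['-']) <;> simp
  have hpre := (PySem.Chars.startswith_iff _ _).mp hb
  exact hk (hpre.subset (by simp))

-- the two fallback computations agree for every dash-free language prefix
theorem pvFallback (lang : String) (hl : '-' ∉ lang.toList) :
    pvScan pvMARKET.items (lang ++ "-")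
      = (let fromLang := (PySem.Dict.get? pvLangIndex lang).getD "";
         if fromLang ≠ "" then fromLang
         else (PySem.Dict.get? pvMARKET "_default").getD "") := by
  by_cases h1 : lang = "vi"
  · subst h1; decide
  by_cases h2 : lang = "th"
  · subst h2; decide
  by_cases h3 : lang = "id"
  · subst h3; decide
  by_cases h4 : lang = "ms"
  · subst h4; decide
  by_cases h5 : lang = "tl"
  · subst h5; decide
  by_cases h6 : lang = "zh"
  · subst h6; decide
  by_cases h7 : lang = "ja"
  · subst h7; decide
  by_cases h8 : lang = "ko"
  · subst h8; decide
  by_cases h9 : lang = "hi"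
  · subst h9; decide
  by_cases h10 : lang = "bn"
  · subst h10; decide
  by_cases h11 : lang = "en"
  · subst h11; decide
  by_cases h12 : lang = "fr"
  · subst h12; decide
  by_cases h13 : lang = "de"
  · subst h13; decide
  by_cases h14 : lang = "es"
  · subst h14; decide
  by_cases h15 : lang = "it"
  · subst h15; decide
  by_cases h16 : lang = "pt"
  · subst h16; decide
  by_cases h17 : lang = "ar"
  · subst h17; decide  -- residual case: lang is none of the table's language prefixes
  have c1 : PySem.Str.startswith "vi-VN" (lang ++ "-") = false := by
    rw [PySem.Str.startswith_eq, String.toList_append]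
    exact pvSwFalse lang.toList ['v', 'i'] ['V', 'N'] hl (by decide) (fun he => h1 (String.toList_inj.mp he))
  have c2 : PySem.Str.startswith "th-TH" (lang ++ "-") = false := by
    rw [PySem.Str.startswith_eq, String.toList_append]
    exact pvSwFalse lang.toList ['t', 'h'] ['T', 'H'] hl (by decide) (fun he => h2 (String.toList_inj.mp he))
  have c3 : PySem.Str.startswith "id-ID" (lang ++ "-") = false := by
    rw [PySem.Str.startswith_eq, String.toList_append]
    exact pvSwFalse lang.toList ['i', 'd'] ['I', 'D'] hl (by decide) (fun he => h3 (String.toList_inj.mp he))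
  have c4 : PySem.Str.startswith "ms-MY" (lang ++ "-") = false := by
    rw [PySem.Str.startswith_eq, String.toList_append]
    exact pvSwFalse lang.toList ['m', 's'] ['M', 'Y'] hl (by decide) (fun he => h4 (String.toList_inj.mp he))
  have c5 : PySem.Str.startswith "tl-PH" (lang ++ "-") = false := by
    rw [PySem.Str.startswith_eq, String.toList_append]
    exact pvSwFalse lang.toList ['t', 'l'] ['P', 'H'] hl (by decide) (fun he => h5 (String.toList_inj.mp he))
  have c6 : PySem.Str.startswith "zh-CN" (lang ++ "-") = false := by
    rw [PySem.Str.startswith_eq, String.toList_append]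
    exact pvSwFalse lang.toList ['z', 'h'] ['C', 'N'] hl (by decide) (fun he => h6 (String.toList_inj.mp he))
  have c7 : PySem.Str.startswith "zh-TW" (lang ++ "-") = false := by
    rw [PySem.Str.startswith_eq, String.toList_append]
    exact pvSwFalse lang.toList ['z', 'h'] ['T', 'W'] hl (by decide) (fun he => h6 (String.toList_inj.mp he))
  have c8 : PySem.Str.startswith "ja-JP" (lang ++ "-") = false := by
    rw [PySem.Str.startswith_eq, String.toList_append]
    exact pvSwFalse lang.toList ['j', 'a'] ['J', 'P'] hl (by decide) (fun he => h7 (String.toList_inj.mp he))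
  have c9 : PySem.Str.startswith "ko-KR" (lang ++ "-") = false := by
    rw [PySem.Str.startswith_eq, String.toList_append]
    exact pvSwFalse lang.toList ['k', 'o'] ['K', 'R'] hl (by decide) (fun he => h8 (String.toList_inj.mp he))
  have c10 : PySem.Str.startswith "hi-IN" (lang ++ "-") = false := by
    rw [PySem.Str.startswith_eq, String.toList_append]
    exact pvSwFalse lang.toList ['h', 'i'] ['I', 'N'] hl (by decide) (fun he => h9 (String.toList_inj.mp he))
  have c11 : PySem.Str.startswith "bn-BD" (lang ++ "-") = false := by
    rw [PySem.Str.startswith_eq, String.toList_append]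
    exact pvSwFalse lang.toList ['b', 'n'] ['B', 'D'] hl (by decide) (fun he => h10 (String.toList_inj.mp he))
  have c12 : PySem.Str.startswith "en-US" (lang ++ "-") = false := by
    rw [PySem.Str.startswith_eq, String.toList_append]
    exact pvSwFalse lang.toList ['e', 'n'] ['U', 'S'] hl (by decide) (fun he => h11 (String.toList_inj.mp he))
  have c13 : PySem.Str.startswith "en-GB" (lang ++ "-") = false := by
    rw [PySem.Str.startswith_eq, String.toList_append]
    exact pvSwFalse lang.toList ['e', 'n'] ['G', 'B'] hl (by decide) (fun he => h11 (String.toList_inj.mp he))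
  have c14 : PySem.Str.startswith "en-AU" (lang ++ "-") = false := by
    rw [PySem.Str.startswith_eq, String.toList_append]
    exact pvSwFalse lang.toList ['e', 'n'] ['A', 'U'] hl (by decide) (fun he => h11 (String.toList_inj.mp he))
  have c15 : PySem.Str.startswith "en-CA" (lang ++ "-") = false := by
    rw [PySem.Str.startswith_eq, String.toList_append]
    exact pvSwFalse lang.toList ['e', 'n'] ['C', 'A'] hl (by decide) (fun he => h11 (String.toList_inj.mp he))
  have c16 : PySem.Str.startswith "fr-FR" (lang ++ "-") = false := by
    rw [PySem.Str.startswith_eq, String.toList_append]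
    exact pvSwFalse lang.toList ['f', 'r'] ['F', 'R'] hl (by decide) (fun he => h12 (String.toList_inj.mp he))
  have c17 : PySem.Str.startswith "de-DE" (lang ++ "-") = false := by
    rw [PySem.Str.startswith_eq, String.toList_append]
    exact pvSwFalse lang.toList ['d', 'e'] ['D', 'E'] hl (by decide) (fun he => h13 (String.toList_inj.mp he))
  have c18 : PySem.Str.startswith "es-ES" (lang ++ "-") = false := by
    rw [PySem.Str.startswith_eq, String.toList_append]
    exact pvSwFalse lang.toList ['e', 's'] ['E', 'S'] hl (by decide) (fun he => h14 (String.toList_inj.mp he))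
  have c19 : PySem.Str.startswith "it-IT" (lang ++ "-") = false := by
    rw [PySem.Str.startswith_eq, String.toList_append]
    exact pvSwFalse lang.toList ['i', 't'] ['I', 'T'] hl (by decide) (fun he => h15 (String.toList_inj.mp he))
  have c20 : PySem.Str.startswith "pt-PT" (lang ++ "-") = false := by
    rw [PySem.Str.startswith_eq, String.toList_append]
    exact pvSwFalse lang.toList ['p', 't'] ['P', 'T'] hl (by decide) (fun he => h16 (String.toList_inj.mp he))
  have c21 : PySem.Str.startswith "pt-BR" (lang ++ "-") = false := by
    rw [PySem.Str.startswith_eq, String.toList_append]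
    exact pvSwFalse lang.toList ['p', 't'] ['B', 'R'] hl (by decide) (fun he => h16 (String.toList_inj.mp he))
  have c22 : PySem.Str.startswith "ar-SA" (lang ++ "-") = false := by
    rw [PySem.Str.startswith_eq, String.toList_append]
    exact pvSwFalse lang.toList ['a', 'r'] ['S', 'A'] hl (by decide) (fun he => h17 (String.toList_inj.mp he))
  have c23 : PySem.Str.startswith "ar-AE" (lang ++ "-") = false := by
    rw [PySem.Str.startswith_eq, String.toList_append]
    exact pvSwFalse lang.toList ['a', 'r'] ['A', 'E'] hl (by decide) (fun he => h17 (String.toList_inj.mp he))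
  have c24 : PySem.Str.startswith "_default" (lang ++ "-") = false := by
    rw [PySem.Str.startswith_eq, String.toList_append]
    exact pvSwNodash lang.toList "_default".toList (by decide)
  have hB : PySem.Dict.get? pvLangIndex lang = none := by
    rw [show pvLangIndex = PySem.Dict.mk [("vi", "vibrant_minimal"), ("th", "vibrant_minimal"), ("id", "vibrant_minimal"), ("ms", "vibrant_minimal"), ("tl", "vibrant_minimal"), ("zh", "clean_modern"), ("ja", "clean_modern"), ("ko", "clean_modern"), ("hi", "bold_expressive"), ("bn", "bold_expressive"), ("en", "professional_bold"), ("fr", "elegant_minimal"), ("de", "clean_modern"), ("es", "vibrant_minimal"), ("it", "elegant_minimal"), ("pt", "vibrant_minimal"), ("ar", "bold_expressive")] from rfl]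
    simp [beq_iff_eq, Ne.symm h1, Ne.symm h2, Ne.symm h3, Ne.symm h4, Ne.symm h5, Ne.symm h6, Ne.symm h7, Ne.symm h8, Ne.symm h9, Ne.symm h10, Ne.symm h11, Ne.symm h12, Ne.symm h13, Ne.symm h14, Ne.symm h15, Ne.symm h16, Ne.symm h17, PySem.Dict.get?]
  rw [show pvMARKET.items = [("vi-VN", "vibrant_minimal"), ("th-TH", "vibrant_minimal"), ("id-ID", "vibrant_minimal"), ("ms-MY", "vibrant_minimal"), ("tl-PH", "vibrant_minimal"), ("zh-CN", "clean_modern"), ("zh-TW", "clean_modern"), ("ja-JP", "clean_modern"), ("ko-KR", "clean_modern"), ("hi-IN", "bold_expressive"), ("bn-BD", "bold_expressive"), ("en-US", "professional_bold"), ("en-GB", "professional_bold"), ("en-AU", "professional_bold"), ("en-CA", "professional_bold"), ("fr-FR", "elegant_minimal"), ("de-DE", "clean_modern"), ("es-ES", "vibrant_minimal"), ("it-IT", "elegant_minimal"), ("pt-PT", "vibrant_minimal"), ("pt-BR", "vibrant_minimal"), ("ar-SA", "bold_expressive"), ("ar-AE", "bold_expressive"), ("_default", "professional_bold")] from rfl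]
  simp only [pvScan, c1, c2, c3, c4, c5, c6, c7, c8, c9, c10, c11, c12, c13, c14, c15, c16, c17, c18, c19, c20, c21, c22, c23, c24, Bool.false_eq_true, if_false, hB]
  simp

-- ===== VERDICT (by name: the statement is the Claim_ definition above) =====
theorem get_style_preset_spec : Claim_equal_get_style_preset := by
  intro mc _
  unfold Spec_get_style_preset get_style_preset get_style_preset_alt
  by_cases hp : ((PySem.Dict.get? pvMARKET mc).getD "") ≠ ""
  · simp only [if_pos hp]
  · simp only [if_neg hp]
    exact pvFallback _ (pvLangDashFree mc)
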